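-- pv_equiv track=rewrite | github.com/anotheranotherhoon/algorithm | 프로그래머스/DPN으로표현.py | solution
-- ===== SOURCE A (Python) =====
-- def solution(N, number):
-- 	s = [set() for x in range(8)]
-- 	for i, x in enumerate(s, start=1):
-- 		x.add(int(str(N) * i))
-- 	for i in range(1, len(s)):
-- 		for j in range(i):
-- 			for op1 in s[j]:
-- 				for op2 in s[i - j - 1]:
-- 					s[i].add(op1 + op2)
-- 					s[i].add(op1 - op2)
-- 					s[i].add(op1 * op2)
-- 					if op2 !=0:
-- 						s[i].add(op1 // op2)
-- 		if number in s[i]: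
-- 			answer = i + 1
-- 			break
-- 		else:
-- 			answer = -1
-- 	return answer
-- ===== SOURCE B (Python) =====
-- def solution(N, number):
--     memo = {}
--
--     def reach(k):
--         # set of all values formable with exactly k copies of N
--         if k in memo:
--             return memo[k]
--         vals = {int(str(N) * k)}
--         for a in range(1, k):
--             left = reach(a)
--             right = reach(k - a)
--             for op1 in left:
--                 for op2 in right:
--                     vals.add(op1 + op2)
--                     vals.add(op1 - op2)
--                     vals.add(op1 * op2)
--                     if op2 != 0:
--                         vals.add(op1 // op2)
--         memo[k] = vals
--         return vals
--
--     for k in range(2, 9):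
--         if number in reach(k):
--             return k
--     return -1
-- ===== Notes on version B (the rewrite author's own statement) =====
-- stated objective: alternative
-- what changed: Replaces A's mutable 8-slot table with nested index loops by a memoized recursive helper reach(k) (set of values formable from exactly k copies of N) plus a separate driver loop over k = 2..8.
import Mathlib
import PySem

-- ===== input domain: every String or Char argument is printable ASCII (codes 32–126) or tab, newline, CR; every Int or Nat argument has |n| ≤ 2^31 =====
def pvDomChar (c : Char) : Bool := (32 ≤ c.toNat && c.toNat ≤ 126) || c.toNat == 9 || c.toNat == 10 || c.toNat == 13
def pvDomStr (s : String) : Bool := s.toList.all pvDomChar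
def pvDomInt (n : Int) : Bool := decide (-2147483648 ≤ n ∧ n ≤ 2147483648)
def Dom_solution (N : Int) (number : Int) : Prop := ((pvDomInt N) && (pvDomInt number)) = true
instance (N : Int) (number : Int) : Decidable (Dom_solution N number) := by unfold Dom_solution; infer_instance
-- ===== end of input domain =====

-- B replaces A's in-place 8-slot table of sets by a memoized recursive reach(k) plus a
-- separate driver loop over the copy count; same asymptotic cost (objective: alternative).

-- shared helper: int(str(N) * k); exact for N ≥ 0 (Pre_); for N < 0 Python raises ValueError
def pvBase (N : Int) (k : Int) : Int :=
  (PySem.Int.ofChars? ((List.replicate k.toNat (PySem.Int.toChars N)).flatten)).getD 0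

-- shared helper: the four 'add' statements of the innermost loop (identical lines in both sources)
def pvAddOps (acc : Std.TreeSet Int) (op1 op2 : Int) : Std.TreeSet Int :=
  let acc := acc.insert (op1 + op2)
  let acc := acc.insert (op1 - op2)
  let acc := acc.insert (op1 * op2)
  if op2 ≠ 0 then acc.insert (PySem.Int.floordiv op1 op2) else acc

-- ===== PORT A =====
-- s[i] after the j-loop of iteration i (pyGetD's default is never reached: all indices are in range)
def aRow (s : List (Std.TreeSet Int)) (i : Int) : Std.TreeSet Int :=
  (PySem.List.pyRange 0 i 1).foldl (fun acc j =>
    (PySem.List.pyGetD s j (Std.TreeSet.empty : Std.TreeSet Int)).foldl (fun acc op1 =>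
      (PySem.List.pyGetD s (i - j - 1) (Std.TreeSet.empty : Std.TreeSet Int)).foldl (fun acc op2 =>
        pvAddOps acc op1 op2) acc) acc)
    (PySem.List.pyGetD s i (Std.TreeSet.empty : Std.TreeSet Int))

-- the 'for i in range(1, len(s))' loop with its break; returns answer
def aLoop (number : Int) (s : List (Std.TreeSet Int)) (i : Nat) : Int :=
  if i < 8 then
    let row := aRow s (i : Int)
    let s' := s.set i row
    if row.contains number then ((i : Int) + 1) else aLoop number s' (i + 1)
  else -1
  termination_by 8 - i

def solution (N : Int) (number : Int) : Int :=
  let s0 : List (Std.TreeSet Int) := (PySem.List.pyRange 0 8 1).map (fun _ => (Std.TreeSet.empty : Std.TreeSet Int))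
  let s : List (Std.TreeSet Int) := (PySem.List.enumerate s0 1).map (fun ix => ix.2.insert (pvBase N ix.1))
  aLoop number s 1

-- ===== PORT B =====
-- reach(k) given the memo 'prev' = [reach 1, …, reach (k-1)] (the Python dict memo, each
-- level computed exactly once, is ported as this list threaded through the driver)
def bStep (N : Int) (prev : List (Std.TreeSet Int)) (k : Int) : Std.TreeSet Int :=
  (PySem.List.pyRange 1 k 1).foldl (fun vals a =>
    let left := PySem.List.pyGetD prev (a - 1) (Std.TreeSet.empty : Std.TreeSet Int)
    let right := PySem.List.pyGetD prev (k - a - 1) (Std.TreeSet.empty : Std.TreeSet Int)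
    left.foldl (fun vals op1 => right.foldl (fun vals op2 => pvAddOps vals op1 op2) vals) vals)
    (Std.TreeSet.empty.insert (pvBase N k))

-- the driver 'for k in range(2, 9)'
def bLoop (N : Int) (number : Int) (prev : List (Std.TreeSet Int)) (k : Nat) : Int :=
  if k ≤ 8 then
    let r := bStep N prev (k : Int)
    if r.contains number then (k : Int) else bLoop N number (prev ++ [r]) (k + 1)
  else -1
  termination_by 9 - k

def solution_alt (N : Int) (number : Int) : Int :=
  bLoop N number [Std.TreeSet.empty.insert (pvBase N 1)] 2

-- ===== PRECONDITION & SPEC =====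
-- For N < 0 Python A raises ValueError (int('-3-3') on the two-copy concatenation), so those
-- inputs are excluded; B raises there too.
def Pre_solution (N : Int) (number : Int) : Prop := 0 ≤ N
instance (N : Int) (number : Int) : Decidable (Pre_solution N number) := by unfold Pre_solution; infer_instance
def pvWitness_solution : Int × Int := (5, 12)

def Spec_solution (N : Int) (number : Int) (out : Int) : Prop := out = solution_alt N number
instance (N : Int) (number : Int) (out : Int) : Decidable (Spec_solution N number out) := by unfold Spec_solution; infer_instance

-- ===== CLAIM (what is proved, stated in full; the proofs are below) =====
def Claim_equal_solution : Prop := ∀ (N : Int) (number : Int), Dom_solution N number → Pre_solution N number → Spec_solution N number (solution N number)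

-- ===== LEMMAS AND PROOFS =====

theorem row_eq (N : Int) (s prev : List (Std.TreeSet Int)) (i : Nat)
    (hlt : ∀ j : Int, 0 ≤ j → j < (i : Int) →
      PySem.List.pyGetD s j (Std.TreeSet.empty : Std.TreeSet Int) = PySem.List.pyGetD prev j (Std.TreeSet.empty : Std.TreeSet Int))
    (hbase : PySem.List.pyGetD s (i : Int) (Std.TreeSet.empty : Std.TreeSet Int) = Std.TreeSet.empty.insert (pvBase N ((i : Int) + 1))) :
    aRow s (i : Int) = bStep N prev ((i : Int) + 1) := by
  unfold aRow bStep
  rw [PySem.List.pyRange_one 0 (i : Int), PySem.List.pyRange_one 1 ((i : Int) + 1)]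
  have hn1 : ((i : Int) - 0).toNat = i := by omega
  have hn2 : (((i : Int) + 1) - 1).toNat = i := by omega
  rw [hn1, hn2, List.foldl_map, List.foldl_map, hbase]
  apply PySem.List.foldl_congr_mem
  intro acc k hk
  have hki : k < i := List.mem_range.mp hk
  have e1 : (0 : Int) + (k : Int) = (k : Int) := by ring
  have e2 : (1 : Int) + (k : Int) - 1 = (k : Int) := by ring
  have e3 : ((i : Int) + 1) - ((1 : Int) + (k : Int)) - 1 = (i : Int) - (k : Int) - 1 := by ring
  have h1 := hlt (k : Int) (by omega) (by omega)
  have h2 := hlt ((i : Int) - (k : Int) - 1) (by omega) (by omega)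
  simp only [e1, e2, e3, h1, h2]

theorem getD_nat (xs : List (Std.TreeSet Int)) (n : Nat) (h : n < xs.length) :
    PySem.List.pyGetD xs (n : Int) (Std.TreeSet.empty : Std.TreeSet Int) = xs[n] := by
  rw [PySem.List.pyGetD_natCast, List.getD_eq_getElem _ _ h]

theorem loops_eq (N number : Int) : ∀ (fuel : Nat) (i : Nat) (s prev : List (Std.TreeSet Int)),
    fuel = 8 - i → s.length = 8 → prev.length = i →
    (∀ j : Int, 0 ≤ j → j < (i : Int) →
      PySem.List.pyGetD s j (Std.TreeSet.empty : Std.TreeSet Int) = PySem.List.pyGetD prev j (Std.TreeSet.empty : Std.TreeSet Int)) →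
    (∀ j : Nat, i ≤ j → j < 8 →
      PySem.List.pyGetD s (j : Int) (Std.TreeSet.empty : Std.TreeSet Int) = Std.TreeSet.empty.insert (pvBase N ((j : Int) + 1))) →
    aLoop number s i = bLoop N number prev (i + 1)
  | 0, i, s, prev, hf, hsl, hpl, hlt, hbase => by
      rw [aLoop, bLoop, if_neg (by omega), if_neg (by omega)]
  | fuel + 1, i, s, prev, hf, hsl, hpl, hlt, hbase => by
      have hi8 : i < 8 := by omega
      rw [aLoop, bLoop, if_pos hi8, if_pos (by omega : i + 1 ≤ 8)]
      have hk : ((i + 1 : Nat) : Int) = (i : Int) + 1 := by push_cast; ring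
      have hrow : aRow s (i : Int) = bStep N prev ((i : Int) + 1) :=
        row_eq N s prev i hlt (hbase i le_rfl hi8)
      simp only [hk, ← hrow]
      split_ifs with hc
      · rfl
      · have hra := loops_eq N number fuel (i + 1) (s.set i (aRow s (i : Int)))
          (prev ++ [aRow s (i : Int)]) (by omega) (by simp [hsl])
          (by simp [hpl])
          (by
            intro j hj0 hji
            obtain ⟨n, rfl⟩ : ∃ n : Nat, j = (n : Int) := ⟨j.toNat, (Int.toNat_of_nonneg hj0).symm⟩
            have hn : n < i + 1 := by exact_mod_cast hji
            have hnset : n < (s.set i (aRow s (i : Int))).length := by simp [hsl]; omega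
            have hnapp : n < (prev ++ [aRow s (i : Int)]).length := by simp [hpl]; omega
            rw [getD_nat _ n hnset, getD_nat _ n hnapp]
            rcases Nat.lt_or_ge n i with hni | hni
            · rw [List.getElem_set_ne (by omega), List.getElem_append_left (by omega)]
              have := hlt (n : Int) (by omega) (by exact_mod_cast hni)
              rw [getD_nat s n (by omega), getD_nat prev n (by omega)] at this
              exact this
            · have hni' : n = i := by omega
              subst hni'
              rw [List.getElem_set_self]
              have : (prev ++ [aRow s (n : Int)])[n] = aRow s (n : Int) := by
                rw [List.getElem_append_right (by omega)]
                simp [hpl]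
              rw [this])
          (by
            intro j hij hj8
            have hjset : j < (s.set i (aRow s (i : Int))).length := by simp [hsl]; omega
            rw [getD_nat _ j hjset, List.getElem_set_ne (by omega)]
            have := hbase j (by omega) hj8
            rw [getD_nat s j (by omega)] at this
            exact this)
        exact hra

-- ===== VERDICT (by name: the statement is the Claim_ definition above) =====
theorem solution_spec : Claim_equal_solution := by
  intro N number _ _
  show solution N number = solution_alt N number
  unfold solution solution_alt
  have hr8 : PySem.List.pyRange 0 8 1 = [0, 1, 2, 3, 4, 5, 6, 7] := by decide
  rw [hr8]
  simp only [List.map_cons, List.map_nil, PySem.List.enumerate_cons, PySem.List.enumerate_nil]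
  norm_num
  refine loops_eq N number 7 1 _ _ rfl (by simp) (by simp) ?_ ?_
  · intro j hj0 hj1
    have : j = 0 := by omega
    subst this
    rw [PySem.List.pyGetD_zero_cons, PySem.List.pyGetD_zero_cons]
  · intro j hj1 hj8
    interval_cases j <;> rw [getD_nat _ _ (by simp)] <;> norm_num
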